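-- pv_equiv track=rewrite | github.com/plouiserre/katas | GameOfLife/tests/test_c.py | __get_all_neighbourgs_coordonnates
-- ===== SOURCE A (Python) =====
-- def __get_all_neighbourgs_coordonnates(coordonnates,grid) :
--     neighbourgs_coordonnates = []
--     left_neighbourg = __find_left_neighbourg(coordonnates)
--     right_neighbourg = __find_right_neighbourg(coordonnates, grid)
--     top_neighbourg = __find_top_neighbourg(coordonnates)
--     bottom_neighbourg = __find_bottom_neighbourg(coordonnates, grid)
--     top_left_neighbourg = __find_top_left_neighbourg(coordonnates)
--     top_right_neighbourg = __find_top_right_neighbourg(coordonnates, grid)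
--     bottom_left_neighbourg = __find_bottom_left_neighbourg(coordonnates, grid)
--     bottom_right_neighbourg = __find_bottom_right_neighbourg(coordonnates, grid)
--     all_coordonnates = [left_neighbourg, right_neighbourg, top_neighbourg, bottom_neighbourg, top_left_neighbourg,
--                         top_right_neighbourg, bottom_left_neighbourg, bottom_right_neighbourg]
--     for coordonnates in all_coordonnates :
--         if coordonnates != None :
--             neighbourgs_coordonnates.append(coordonnates)
--     return neighbourgs_coordonnates
--
-- def __find_left_neighbourg(coordonnates) :
--     y = coordonnates[0]
--     x = coordonnates[1]
--     new_x = x - 1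
--     if new_x >= 0 :
--         return [y, new_x]
--     else :
--         return None
--
-- def __find_right_neighbourg(coordonnates, grid) :
--     y = coordonnates[0]
--     x = coordonnates[1]
--     new_x = x + 1
--     if new_x < len(grid[0]) :
--         return [y, new_x]
--     else :
--         return None
--
-- def __find_top_neighbourg(coordonnates):
--     y = coordonnates[0]
--     x = coordonnates[1]
--     new_y = y - 1
--     if new_y >= 0 :
--         return [new_y, x]
--     else :
--         return None
--
-- def __find_bottom_neighbourg(coordonnates, grid):
--     y = coordonnates[0]
--     x = coordonnates[1]
--     new_y = y + 1
--     if new_y < len(grid):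
--         return [new_y, x]
--     else :
--         return None
--
-- def __find_top_left_neighbourg(coordonnates):
--     y = coordonnates[0]
--     x = coordonnates[1]
--     new_y = y - 1
--     new_x = x - 1
--     if new_y >= 0 and new_x >= 0:
--         return [new_y, new_x]
--     else :
--         return None
--
-- def __find_top_right_neighbourg(coordonnates, grid):
--     y = coordonnates[0]
--     x = coordonnates[1]
--     new_y = y - 1
--     new_x = x + 1
--     if new_y >= 0 and new_x < len(grid[0]):
--         return [new_y, new_x]
--     else :
--         return None
--
-- def __find_bottom_left_neighbourg(coordonnates, grid):
--     y = coordonnates[0]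
--     x = coordonnates[1]
--     new_y = y + 1
--     new_x = x - 1
--     if new_y < len(grid) and new_x >= 0:
--         return [new_y, new_x]
--     else :
--         return None
--
-- def __find_bottom_right_neighbourg(coordonnates, grid):
--     y = coordonnates[0]
--     x = coordonnates[1]
--     new_y = y + 1
--     new_x = x + 1
--     if new_y < len(grid) and new_x < len(grid[0]):
--         return [new_y, new_x]
--     else :
--         return None
-- ===== SOURCE B (Python) =====
-- def __get_all_neighbourgs_coordonnates(coordonnates, grid):
--     y, x = coordonnates[0], coordonnates[1]
--     height, width = len(grid), len(grid[0])
--     cols = []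
--     if x > 0:
--         cols.append(x - 1)
--     if x + 1 < width:
--         cols.append(x + 1)
--     rows = []
--     if y > 0:
--         rows.append(y - 1)
--     if y + 1 < height:
--         rows.append(y + 1)
--     return ([[y, c] for c in cols]
--             + [[r, x] for r in rows]
--             + [[r, c] for r in rows for c in cols])
-- ===== Notes on version B (the rewrite author's own statement) =====
-- stated objective: simpler
-- what changed: Instead of eight per-direction helper functions, B computes the valid neighbour row and column coordinate lists once (four bound tests instead of twelve) and assembles the result from them, generating the four diagonals as the product rows x cols; Pre_ only excludes inputs where A raises IndexError (coordonnates shorter than 2 or empty grid).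
import Mathlib
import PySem

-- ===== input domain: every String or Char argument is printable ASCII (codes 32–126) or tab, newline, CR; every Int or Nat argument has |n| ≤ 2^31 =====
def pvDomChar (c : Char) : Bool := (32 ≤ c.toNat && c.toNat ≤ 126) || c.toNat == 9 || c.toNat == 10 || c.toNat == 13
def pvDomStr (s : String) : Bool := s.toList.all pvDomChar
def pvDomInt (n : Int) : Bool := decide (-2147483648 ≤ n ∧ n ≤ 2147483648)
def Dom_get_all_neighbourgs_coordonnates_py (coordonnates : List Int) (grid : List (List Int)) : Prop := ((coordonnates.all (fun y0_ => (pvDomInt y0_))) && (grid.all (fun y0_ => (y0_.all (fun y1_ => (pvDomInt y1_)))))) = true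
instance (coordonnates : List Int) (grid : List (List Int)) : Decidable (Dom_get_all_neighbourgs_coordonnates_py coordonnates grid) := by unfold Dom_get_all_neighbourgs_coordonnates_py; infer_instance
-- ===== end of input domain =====

-- B replaces A's eight per-direction helpers with two staged lists (the valid row and
-- column coordinates, found once) and builds the output from them, generating the four
-- diagonals as the product rows × cols (objective: simpler).

-- ===== PORT A =====
def pvFindLeft (coordonnates : List Int) : Option (List Int) :=
  let y := ((PySem.List.pyGet? coordonnates 0).getD 0)
  let x := ((PySem.List.pyGet? coordonnates 1).getD 0)
  let new_x := x - 1
  if new_x ≥ 0 then some [y, new_x] else none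

def pvFindRight (coordonnates : List Int) (grid : List (List Int)) : Option (List Int) :=
  let y := ((PySem.List.pyGet? coordonnates 0).getD 0)
  let x := ((PySem.List.pyGet? coordonnates 1).getD 0)
  let new_x := x + 1
  if new_x < (((PySem.List.pyGet? grid 0).getD []).length : Int) then some [y, new_x] else none

def pvFindTop (coordonnates : List Int) : Option (List Int) :=
  let y := ((PySem.List.pyGet? coordonnates 0).getD 0)
  let x := ((PySem.List.pyGet? coordonnates 1).getD 0)
  let new_y := y - 1
  if new_y ≥ 0 then some [new_y, x] else none

def pvFindBottom (coordonnates : List Int) (grid : List (List Int)) : Option (List Int) :=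
  let y := ((PySem.List.pyGet? coordonnates 0).getD 0)
  let x := ((PySem.List.pyGet? coordonnates 1).getD 0)
  let new_y := y + 1
  if new_y < (grid.length : Int) then some [new_y, x] else none

def pvFindTopLeft (coordonnates : List Int) : Option (List Int) :=
  let y := ((PySem.List.pyGet? coordonnates 0).getD 0)
  let x := ((PySem.List.pyGet? coordonnates 1).getD 0)
  let new_y := y - 1
  let new_x := x - 1
  if new_y ≥ 0 ∧ new_x ≥ 0 then some [new_y, new_x] else none

def pvFindTopRight (coordonnates : List Int) (grid : List (List Int)) : Option (List Int) :=
  let y := ((PySem.List.pyGet? coordonnates 0).getD 0)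
  let x := ((PySem.List.pyGet? coordonnates 1).getD 0)
  let new_y := y - 1
  let new_x := x + 1
  if new_y ≥ 0 ∧ new_x < (((PySem.List.pyGet? grid 0).getD []).length : Int) then some [new_y, new_x] else none

def pvFindBottomLeft (coordonnates : List Int) (grid : List (List Int)) : Option (List Int) :=
  let y := ((PySem.List.pyGet? coordonnates 0).getD 0)
  let x := ((PySem.List.pyGet? coordonnates 1).getD 0)
  let new_y := y + 1
  let new_x := x - 1
  if new_y < (grid.length : Int) ∧ new_x ≥ 0 then some [new_y, new_x] else none

def pvFindBottomRight (coordonnates : List Int) (grid : List (List Int)) : Option (List Int) :=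
  let y := ((PySem.List.pyGet? coordonnates 0).getD 0)
  let x := ((PySem.List.pyGet? coordonnates 1).getD 0)
  let new_y := y + 1
  let new_x := x + 1
  if new_y < (grid.length : Int) ∧ new_x < (((PySem.List.pyGet? grid 0).getD []).length : Int) then some [new_y, new_x] else none

def get_all_neighbourgs_coordonnates_py (coordonnates : List Int) (grid : List (List Int)) : List (List Int) :=
  let all_coordonnates := [pvFindLeft coordonnates, pvFindRight coordonnates grid,
    pvFindTop coordonnates, pvFindBottom coordonnates grid, pvFindTopLeft coordonnates,
    pvFindTopRight coordonnates grid, pvFindBottomLeft coordonnates grid,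
    pvFindBottomRight coordonnates grid]
  all_coordonnates.foldl (fun acc c => match c with
    | some v => acc ++ [v]
    | none => acc) []

-- ===== PORT B =====
def get_all_neighbourgs_coordonnates_py_alt (coordonnates : List Int) (grid : List (List Int)) : List (List Int) :=
  let y := ((PySem.List.pyGet? coordonnates 0).getD 0)
  let x := ((PySem.List.pyGet? coordonnates 1).getD 0)
  let height := (grid.length : Int)
  let width := (((PySem.List.pyGet? grid 0).getD []).length : Int)
  let cols := (if x > 0 then [x - 1] else []) ++ (if x + 1 < width then [x + 1] else [])
  let rows := (if y > 0 then [y - 1] else []) ++ (if y + 1 < height then [y + 1] else [])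
  (cols.map fun c => [y, c]) ++ (rows.map fun r => [r, x]) ++
    (rows.flatMap fun r => cols.map fun c => [r, c])

-- ===== PRECONDITION & SPEC =====
-- Pre_: A unconditionally indexes coordonnates[0], coordonnates[1] and grid[0]; it raises
-- IndexError when coordonnates has fewer than two elements or grid is empty. Nothing else is excluded.
def Pre_get_all_neighbourgs_coordonnates_py (coordonnates : List Int) (grid : List (List Int)) : Prop :=
  2 ≤ coordonnates.length ∧ grid ≠ []
instance (coordonnates : List Int) (grid : List (List Int)) : Decidable (Pre_get_all_neighbourgs_coordonnates_py coordonnates grid) := by unfold Pre_get_all_neighbourgs_coordonnates_py; infer_instance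

def pvWitness_get_all_neighbourgs_coordonnates_py : List Int × List (List Int) := ([1, 1], [[0, 0, 0], [0, 1, 0], [0, 0, 0]])

def Spec_get_all_neighbourgs_coordonnates_py (coordonnates : List Int) (grid : List (List Int)) (out : List (List Int)) : Prop := out = get_all_neighbourgs_coordonnates_py_alt coordonnates grid
instance (coordonnates : List Int) (grid : List (List Int)) (out : List (List Int)) : Decidable (Spec_get_all_neighbourgs_coordonnates_py coordonnates grid out) := by unfold Spec_get_all_neighbourgs_coordonnates_py; infer_instance

-- ===== CLAIM (what is proved, stated in full; the proofs are below) =====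
def Claim_equal_get_all_neighbourgs_coordonnates_py : Prop := ∀ (coordonnates : List Int) (grid : List (List Int)), Dom_get_all_neighbourgs_coordonnates_py coordonnates grid → Pre_get_all_neighbourgs_coordonnates_py coordonnates grid → Spec_get_all_neighbourgs_coordonnates_py coordonnates grid (get_all_neighbourgs_coordonnates_py coordonnates grid)

-- ===== LEMMAS AND PROOFS =====
-- Both sides depend on the input only through y, x, grid.length and len(grid[0]);
-- this generalized equality, by cases on the four bound tests, is the whole proof.
theorem pv_gen (y x H W : Int) :
    ([ (if x - 1 ≥ 0 then some [y, x - 1] else none),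
      (if x + 1 < W then some [y, x + 1] else none),
      (if y - 1 ≥ 0 then some [y - 1, x] else none),
      (if y + 1 < H then some [y + 1, x] else none),
      (if y - 1 ≥ 0 ∧ x - 1 ≥ 0 then some [y - 1, x - 1] else none),
      (if y - 1 ≥ 0 ∧ x + 1 < W then some [y - 1, x + 1] else none),
      (if y + 1 < H ∧ x - 1 ≥ 0 then some [y + 1, x - 1] else none),
      (if y + 1 < H ∧ x + 1 < W then some [y + 1, x + 1] else none)].foldl
        (fun acc c => match c with
          | some v => acc ++ [v]
          | none => acc) ([] : List (List Int))) =
    (let cols := (if x > 0 then [x - 1] else []) ++ (if x + 1 < W then [x + 1] else [])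
     let rows := (if y > 0 then [y - 1] else []) ++ (if y + 1 < H then [y + 1] else [])
     (cols.map fun c => [y, c]) ++ (rows.map fun r => [r, x]) ++
       (rows.flatMap fun r => cols.map fun c => [r, c])) := by
  by_cases h1 : (1 : Int) ≤ x <;> by_cases h2 : x + 1 < W <;> by_cases h3 : (1 : Int) ≤ y <;>
    by_cases h4 : y + 1 < H <;>
  · simp only [List.foldl]
    norm_num [h1, h2, h3, h4, show ((0 : Int) < x ↔ 1 ≤ x) from by omega,
      show ((0 : Int) < y ↔ 1 ≤ y) from by omega]

-- ===== VERDICT (by name: the statement is the Claim_ definition above) =====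
theorem get_all_neighbourgs_coordonnates_py_spec : Claim_equal_get_all_neighbourgs_coordonnates_py := by
  intro coordonnates grid _ _
  unfold Spec_get_all_neighbourgs_coordonnates_py
  simp only [get_all_neighbourgs_coordonnates_py, get_all_neighbourgs_coordonnates_py_alt,
    pvFindLeft, pvFindRight, pvFindTop, pvFindBottom, pvFindTopLeft, pvFindTopRight,
    pvFindBottomLeft, pvFindBottomRight]
  exact pv_gen _ _ _ _
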